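-- pv_equiv track=rewrite | github.com/wlsgh7608/TIL | algorithm/greedy/programmers/체육복.py | solution
-- ===== SOURCE A (Python) =====
-- def solution(n, lost, reserve):
--     # lost,reserve 리스트를 오름차순으로 정렬
--
--
--     """
--     same = []
--     for _l in lost:
--         if _l in reserve:
--             same.append(_l)
--
--     for _s in same:
--         lost.remove(_s)
--         reserve.remove(_s)
--
--     중복 제거
--     실행시간 O(len(lost)*len(reserve)) -> O(n^2)
--
--     """
--
--     # set 자료형 이용
--     """
--     set() - O(s)
--     차집합 - O(s1+s2)
--     """
--
--
--     l_set = set(lost)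
--     r_set = set(reserve)
--
--     lost,reserve = l_set-r_set, r_set-l_set
--
--
--     total = n-len(lost) # 체육복챙긴 학생
--     asc_lost = sorted(lost) # 오름차순 정렬 -> O(nlogn)
--     for l in asc_lost:
--         if l-1 in reserve:
--             total+=1
--             reserve.remove(l-1)
--
--         elif l+1 in reserve:
--             total+=1
--             reserve.remove(l+1)
--
--     return total
-- ===== SOURCE B (Python) =====
-- def solution(n, lost, reserve):
--     # Two-pointer merge of the two sorted disjoint lists: walk the sorted
--     # lost-only and reserve-only students once, matching l with the smallest
--     # unused spare r with l-1 <= r <= l+1; no membership tests or removals.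
--     lost_only = sorted(set(lost) - set(reserve))
--     reserve_only = sorted(set(reserve) - set(lost))
--     matched = 0
--     i = j = 0
--     while i < len(lost_only) and j < len(reserve_only):
--         l, r = lost_only[i], reserve_only[j]
--         if r < l - 1:
--             j += 1
--         elif r <= l + 1:
--             matched += 1
--             i += 1
--             j += 1
--         else:
--             i += 1
--     return n - len(lost_only) + matched
-- ===== Notes on version B (the rewrite author's own statement) =====
-- stated objective: alternative
-- what changed: Replaced A's per-student membership test and removal in a mutable reserve set by a single two-pointer merge of the two sorted disjoint lists (lost-only and reserve-only), matching each lost student with the smallest unused spare within distance 1.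
import Mathlib
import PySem

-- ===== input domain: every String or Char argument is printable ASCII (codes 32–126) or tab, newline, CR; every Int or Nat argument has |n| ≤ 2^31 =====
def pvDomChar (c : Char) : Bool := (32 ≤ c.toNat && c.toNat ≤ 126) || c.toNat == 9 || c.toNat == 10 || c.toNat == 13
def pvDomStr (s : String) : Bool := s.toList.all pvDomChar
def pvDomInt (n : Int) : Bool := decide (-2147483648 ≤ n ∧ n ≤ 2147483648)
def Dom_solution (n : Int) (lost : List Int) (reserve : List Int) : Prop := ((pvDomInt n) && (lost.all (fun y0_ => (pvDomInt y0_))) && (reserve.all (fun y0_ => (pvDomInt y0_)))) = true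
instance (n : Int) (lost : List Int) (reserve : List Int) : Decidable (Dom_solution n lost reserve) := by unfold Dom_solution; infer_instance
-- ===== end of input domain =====

-- B replaces A's per-student membership-test-and-remove on a mutable reserve set by a single
-- two-pointer merge of the two sorted disjoint lists (lost-only, reserve-only), matching each
-- lost student with the smallest unused spare within distance 1 (objective: alternative
-- algorithm, same cost). Neither version mutates its arguments.

-- ===== PORT A =====
-- loop body of A's 'for l in asc_lost' (reserve.remove under the membership guard is
-- exactly Set.discard there)
def solutionStep (st : Int × PySem.Set Int) (l : Int) : Int × PySem.Set Int :=
  if PySem.Set.contains st.2 (l - 1) then (st.1 + 1, PySem.Set.discard st.2 (l - 1))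
  else if PySem.Set.contains st.2 (l + 1) then (st.1 + 1, PySem.Set.discard st.2 (l + 1))
  else st

def solution (n : Int) (lost : List Int) (reserve : List Int) : Int :=
  let lset : PySem.Set Int := PySem.Set.ofList lost
  let rset : PySem.Set Int := PySem.Set.ofList reserve
  let lost2 : PySem.Set Int := PySem.Set.diff lset rset
  let reserve2 : PySem.Set Int := PySem.Set.diff rset lset
  let total : Int := n - PySem.Set.len lost2
  let ascLost := PySem.List.sorted lost2 (fun x => x)
  (ascLost.foldl solutionStep (total, reserve2)).1

-- ===== PORT B =====
-- Source B's while loop over the two indices i (into lost_only) and j (into reserve_only);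
-- the fuel argument only makes the loop total (it is started at |L|+|R|, enough for every
-- iteration, since i+j grows each time round)
def matchLoop (L R : List Int) : Nat → Nat → Nat → Int → Int
  | 0, _, _, matched => matched
  | fuel + 1, i, j, matched =>
    if h : i < L.length ∧ j < R.length then
      if R[j]'h.2 < L[i]'h.1 - 1 then matchLoop L R fuel i (j + 1) matched
      else if R[j]'h.2 ≤ L[i]'h.1 + 1 then matchLoop L R fuel (i + 1) (j + 1) (matched + 1)
      else matchLoop L R fuel (i + 1) j matched
    else matched

def solution_alt (n : Int) (lost : List Int) (reserve : List Int) : Int :=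
  let lostOnly := PySem.List.sorted
    (PySem.Set.diff (PySem.Set.ofList lost) (PySem.Set.ofList reserve)) (fun x => x)
  let reserveOnly := PySem.List.sorted
    (PySem.Set.diff (PySem.Set.ofList reserve) (PySem.Set.ofList lost)) (fun x => x)
  n - lostOnly.length + matchLoop lostOnly reserveOnly (lostOnly.length + reserveOnly.length) 0 0 0

-- ===== PRECONDITION & SPEC =====
def Spec_solution (n : Int) (lost : List Int) (reserve : List Int) (out : Int) : Prop := out = solution_alt n lost reserve
instance (n : Int) (lost : List Int) (reserve : List Int) (out : Int) : Decidable (Spec_solution n lost reserve out) := by unfold Spec_solution; infer_instance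

-- ===== CLAIM (what is proved, stated in full; the proofs are below) =====
def Claim_equal_solution : Prop := ∀ (n : Int) (lost : List Int) (reserve : List Int), Dom_solution n lost reserve → Spec_solution n lost reserve (solution n lost reserve)

-- ===== LEMMAS AND PROOFS =====

-- B's two-pointer loop on the list suffixes (proof-side recursion mirror of matchLoop)
def match2 : List Int → List Int → Int
  | [], _ => 0
  | _ :: _, [] => 0
  | l :: ls, r :: rs =>
    if r < l - 1 then match2 (l :: ls) rs
    else if r ≤ l + 1 then 1 + match2 ls rs
    else match2 ls (r :: rs)
termination_by ls rs => ls.length + rs.length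

lemma match2_nil_right (ls : List Int) : match2 ls [] = 0 := by
  cases ls <;> simp [match2]

lemma matchLoop_eq (L R : List Int) (fuel i j : Nat) (m : Int)
    (hf : L.length - i + (R.length - j) ≤ fuel) :
    matchLoop L R fuel i j m = m + match2 (L.drop i) (R.drop j) := by
  induction fuel generalizing i j m with
  | zero =>
    simp only [matchLoop]
    rcases Nat.lt_or_ge i L.length with hi | hi
    · rw [List.drop_eq_nil_of_le (by omega : R.length ≤ j), match2_nil_right]
      ring
    · rw [List.drop_eq_nil_of_le hi]
      simp [match2]
  | succ fuel ih =>
    simp only [matchLoop]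
    by_cases h : i < L.length ∧ j < R.length
    · rw [dif_pos h, List.drop_eq_getElem_cons h.1, List.drop_eq_getElem_cons h.2]
      simp only [match2]
      split_ifs with h1 h2
      · rw [ih i (j + 1) m (by omega), List.drop_eq_getElem_cons h.1]
      · rw [ih (i + 1) (j + 1) (m + 1) (by omega)]
        ring
      · rw [ih (i + 1) j m (by omega), List.drop_eq_getElem_cons h.2]
    · rw [dif_neg h]
      rcases Nat.lt_or_ge i L.length with hi | hi
      · rw [List.drop_eq_nil_of_le (by omega : R.length ≤ j), match2_nil_right]
        ring
      · rw [List.drop_eq_nil_of_le hi]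
        simp [match2]

-- the coupled sweep: A's fold over the sorted lost-only list with the reserve set S
-- against B's two-pointer merge with the sorted reserve-only list rs
theorem sweep_key (ls rs : List Int) (S : PySem.Set Int) (t : Int)
    (hls : ls.Pairwise (· < ·)) (hrs : rs.Pairwise (· < ·))
    (hdis : ∀ x ∈ ls, x ∉ S)
    (hagree : ∀ x : Int, ∀ l ∈ ls.head?, l - 1 ≤ x → (x ∈ S ↔ x ∈ rs)) :
    (ls.foldl solutionStep (t, S)).1 = t + match2 ls rs := by
  match ls, rs with
  | [], rs => simp [match2]
  | l :: ls', rs =>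
    have hag : ∀ x : Int, l - 1 ≤ x → (x ∈ S ↔ x ∈ rs) := by
      intro x hx; exact hagree x l (by simp) hx
    have hlt' : ∀ b ∈ ls', l < b := (List.pairwise_cons.mp hls).1
    have hls' : ls'.Pairwise (· < ·) := (List.pairwise_cons.mp hls).2
    have hlS : l ∉ S := hdis l (List.mem_cons_self ..)
    have hhead' : ∀ l' ∈ ls'.head?, l ≤ l' - 1 := by
      intro l' hl'
      have := hlt' l' (List.mem_of_mem_head? hl')
      omega
    match rs with
    | [] =>
      have hm1 : (l - 1) ∉ S := fun h => by simpa using (hag (l - 1) (by omega)).mp h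
      have hm2 : (l + 1) ∉ S := fun h => by simpa using (hag (l + 1) (by omega)).mp h
      have hstep : solutionStep (t, S) l = (t, S) := by simp [solutionStep, hm1, hm2]
      have hrec := sweep_key ls' [] S t hls' (by simp)
        (fun x hx => hdis x (List.mem_cons_of_mem _ hx))
        (by
          intro x l' hl' hx
          exact hag x (by have := hhead' l' hl'; omega))
      simpa [List.foldl_cons, hstep, match2_nil_right] using hrec
    | r :: rs'' =>
      have hrlt : ∀ b ∈ rs'', r < b := (List.pairwise_cons.mp hrs).1
      have hrs'' : rs''.Pairwise (· < ·) := (List.pairwise_cons.mp hrs).2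
      by_cases hc1 : r < l - 1
      · -- dead spare r: B drops it, A's loop never looks at it
        have hrec := sweep_key (l :: ls') rs'' S t hls hrs'' hdis
          (by
            intro x l' hl' hx
            have hl'' : l = l' := by simpa using hl'
            subst hl''
            rw [hag x hx]
            have hxr : x ≠ r := by omega
            simp [hxr])
        rw [match2, if_pos hc1]
        exact hrec
      · by_cases hc2 : r ≤ l + 1
        · -- r matches l; A removes exactly this r from its set
          have hrS : r ∈ S := (hag r (by omega)).mpr (List.mem_cons_self ..)
          have hrne : r ≠ l := fun h => hlS (h ▸ hrS)
          have hagree' : ∀ x : Int, ∀ l' ∈ ls'.head?, l' - 1 ≤ x →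
              (x ∈ PySem.Set.discard S r ↔ x ∈ rs'') := by
            intro x l' hl' hx
            have hlx : l ≤ x := le_trans (hhead' l' hl') hx
            rw [PySem.Set.mem_discard]
            constructor
            · intro ⟨hxS, hxr⟩
              have := (hag x (by omega)).mp hxS
              simp only [List.mem_cons] at this
              tauto
            · intro hx''
              have hrx : r < x := hrlt x hx''
              exact ⟨(hag x (by omega)).mpr (List.mem_cons_of_mem _ hx''), by omega⟩
          have hdis' : ∀ x ∈ ls', x ∉ PySem.Set.discard S r := by
            intro x hx h
            exact hdis x (List.mem_cons_of_mem _ hx) ((PySem.Set.mem_discard _ _ _).mp h).1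
          have hrec := sweep_key ls' rs'' (PySem.Set.discard S r) (t + 1)
            hls' hrs'' hdis' hagree'
          have hstep : solutionStep (t, S) l = (t + 1, PySem.Set.discard S r) := by
            rcases (by omega : r = l - 1 ∨ r = l + 1) with h | h
            · subst h; simp [solutionStep, hrS]
            · subst h
              have hm1 : (l - 1) ∉ S := by
                intro hmem
                have := (hag (l - 1) (by omega)).mp hmem
                simp only [List.mem_cons] at this
                rcases this with h' | h'
                · omega
                · have := hrlt _ h'; omega
              simp [solutionStep, hm1, hrS]
          rw [List.foldl_cons, hstep, hrec, match2, if_neg hc1, if_pos hc2]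
          ring
        · -- every remaining spare is beyond l+1: neither side matches l
          have hnm : ∀ y : Int, l - 1 ≤ y → y ≤ l + 1 → y ∉ S := by
            intro y hy1 hy2 hmem
            have := (hag y hy1).mp hmem
            simp only [List.mem_cons] at this
            rcases this with h' | h'
            · omega
            · have := hrlt _ h'; omega
          have hm1 : (l - 1) ∉ S := hnm _ (by omega) (by omega)
          have hm2 : (l + 1) ∉ S := hnm _ (by omega) (by omega)
          have hstep : solutionStep (t, S) l = (t, S) := by simp [solutionStep, hm1, hm2]
          have hrec := sweep_key ls' (r :: rs'') S t hls' hrs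
            (fun x hx => hdis x (List.mem_cons_of_mem _ hx))
            (by
              intro x l' hl' hx
              exact hag x (by have := hhead' l' hl'; omega))
          rw [List.foldl_cons, hstep, match2, if_neg hc1, if_neg hc2]
          exact hrec
termination_by ls.length + rs.length
decreasing_by all_goals (simp only [List.length_cons]; omega)

lemma solution_eq_alt (n : Int) (lost reserve : List Int) :
    solution n lost reserve = solution_alt n lost reserve := by
  unfold solution solution_alt
  dsimp only
  set L2 : PySem.Set Int := PySem.Set.diff (PySem.Set.ofList lost) (PySem.Set.ofList reserve) with hL2
  set R2 : PySem.Set Int := PySem.Set.diff (PySem.Set.ofList reserve) (PySem.Set.ofList lost) with hR2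
  set Ls : List Int := PySem.List.sorted L2 (fun x => x) with hLs
  set Rs : List Int := PySem.List.sorted R2 (fun x => x) with hRs
  have hndL2 : L2.Nodup := PySem.Set.nodup_diff _ _ (PySem.Set.nodup_ofList lost)
  have hndR2 : R2.Nodup := PySem.Set.nodup_diff _ _ (PySem.Set.nodup_ofList reserve)
  have hLperm : Ls.Perm L2 := PySem.List.sorted_perm _ _ _
  have hRperm : Rs.Perm R2 := PySem.List.sorted_perm _ _ _
  have hLnd : Ls.Nodup := hLperm.nodup_iff.mpr hndL2
  have hRnd : Rs.Nodup := hRperm.nodup_iff.mpr hndR2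
  have hLlt : Ls.Pairwise (· < ·) :=
    List.Pairwise.imp (fun h => lt_of_le_of_ne h.1 h.2)
      ((PySem.List.sorted_pairwise L2 (fun x => x)).and hLnd)
  have hRlt : Rs.Pairwise (· < ·) :=
    List.Pairwise.imp (fun h => lt_of_le_of_ne h.1 h.2)
      ((PySem.List.sorted_pairwise R2 (fun x => x)).and hRnd)
  have hdis : ∀ x ∈ Ls, x ∉ R2 := by
    intro x hx hxR
    have hxL : x ∈ L2 := hLperm.mem_iff.mp hx
    rw [hL2, PySem.Set.mem_diff, PySem.Set.mem_ofList, PySem.Set.mem_ofList] at hxL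
    rw [hR2, PySem.Set.mem_diff, PySem.Set.mem_ofList, PySem.Set.mem_ofList] at hxR
    exact hxR.2 hxL.1
  have hagree : ∀ x : Int, ∀ l ∈ Ls.head?, l - 1 ≤ x → (x ∈ R2 ↔ x ∈ Rs) := by
    intro x _ _ _
    exact (hRperm.mem_iff.symm)
  have hkey := sweep_key Ls Rs R2 (n - PySem.Set.len L2) hLlt hRlt hdis hagree
  rw [hkey, matchLoop_eq _ _ _ _ _ _ (by omega)]
  simp only [List.drop_zero]
  have hlen : PySem.Set.len L2 = (Ls.length : Int) := by
    simp [PySem.Set.len, hLperm.length_eq]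
  rw [hlen]
  ring

-- ===== VERDICT (by name: the statement is the Claim_ definition above) =====
theorem solution_spec : Claim_equal_solution := by
  intro n lost reserve _
  unfold Spec_solution
  exact solution_eq_alt n lost reserve
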